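-- pv_equiv track=rewrite | github.com/TitaniumMonkey/LLM_Hardware_Calculator | app.py | suggest_gpu
-- ===== SOURCE A (Python) =====
-- from collections import defaultdict
--
-- def suggest_gpu(total_memory_gb):
--     gpus = [
--         {'name': 'NVIDIA H100', 'memory': 80, 'max_gpus': 8},
--         {'name': 'NVIDIA A100', 'memory': 80, 'max_gpus': 8},
--         {'name': 'NVIDIA A6000', 'memory': 48, 'max_gpus': 10},
--         {'name': 'NVIDIA A40', 'memory': 48, 'max_gpus': 10},
--         {'name': 'NVIDIA L40', 'memory': 48, 'max_gpus': 8},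
--         {'name': 'NVIDIA L40S', 'memory': 48, 'max_gpus': 8},
--         {'name': 'NVIDIA RTX 6000 Ada', 'memory': 48, 'max_gpus': 8},
--         {'name': 'NVIDIA RTX 4090', 'memory': 24, 'max_gpus': 8},
--         {'name': 'NVIDIA RTX 3090', 'memory': 24, 'max_gpus': 8},
--         {'name': 'NVIDIA RTX A5000', 'memory': 24, 'max_gpus': 8},
--         {'name': 'NVIDIA L4', 'memory': 24, 'max_gpus': 8},
--         {'name': 'NVIDIA RTX 4000', 'memory': 16, 'max_gpus': 8},
--         {'name': 'NVIDIA A4000', 'memory': 16, 'max_gpus': 8},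
--     ]
--
--     grouped_gpus = defaultdict(list)
--     for gpu in gpus:
--         grouped_gpus[gpu['memory']].append(gpu)
--
--     possible_setups = []
--     for mem_size in sorted(grouped_gpus.keys(), reverse=True):
--         gpu_list = grouped_gpus[mem_size]
--         max_gpus = max(gpu['max_gpus'] for gpu in gpu_list)
--         for num_gpus in range(1, max_gpus + 1):
--             total_gpu_memory = mem_size * num_gpus
--             if total_gpu_memory >= total_memory_gb:
--                 compatible_gpus = [gpu['name'] for gpu in gpu_list if num_gpus <= gpu['max_gpus']]
--                 if compatible_gpus:
--                     config = f"{num_gpus} x {mem_size}GB GPUs"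
--                     gpu_names = ', '.join(compatible_gpus)
--                     setup = {
--                         'config': config,
--                         'gpu_names': gpu_names
--                     }
--                     possible_setups.append(setup)
--                 break  # Found the minimal number of GPUs needed for this memory size
--     return possible_setups
-- ===== SOURCE B (Python) =====
-- def suggest_gpu(total_memory_gb):
--     tiers = [
--         (80, [('NVIDIA H100', 8), ('NVIDIA A100', 8)]),
--         (48, [('NVIDIA A6000', 10), ('NVIDIA A40', 10), ('NVIDIA L40', 8),
--               ('NVIDIA L40S', 8), ('NVIDIA RTX 6000 Ada', 8)]),
--         (24, [('NVIDIA RTX 4090', 8), ('NVIDIA RTX 3090', 8),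
--               ('NVIDIA RTX A5000', 8), ('NVIDIA L4', 8)]),
--         (16, [('NVIDIA RTX 4000', 8), ('NVIDIA A4000', 8)]),
--     ]
--     setups = []
--     for mem, group in tiers:
--         needed = max(1, -(-total_memory_gb // mem))  # ceil division, at least one GPU
--         names = [name for name, max_gpus in group if max_gpus >= needed]
--         if names:
--             setups.append({'config': f"{needed} x {mem}GB GPUs",
--                            'gpu_names': ', '.join(names)})
--     return setups
-- ===== Notes on version B (the rewrite author's own statement) =====
-- stated objective: simpler
-- what changed: Replaced the defaultdict grouping plus inner linear search for the minimal GPU count by a static tier table and a closed-form ceiling division needed = max(1, ceil(total/mem)).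
import Mathlib
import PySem

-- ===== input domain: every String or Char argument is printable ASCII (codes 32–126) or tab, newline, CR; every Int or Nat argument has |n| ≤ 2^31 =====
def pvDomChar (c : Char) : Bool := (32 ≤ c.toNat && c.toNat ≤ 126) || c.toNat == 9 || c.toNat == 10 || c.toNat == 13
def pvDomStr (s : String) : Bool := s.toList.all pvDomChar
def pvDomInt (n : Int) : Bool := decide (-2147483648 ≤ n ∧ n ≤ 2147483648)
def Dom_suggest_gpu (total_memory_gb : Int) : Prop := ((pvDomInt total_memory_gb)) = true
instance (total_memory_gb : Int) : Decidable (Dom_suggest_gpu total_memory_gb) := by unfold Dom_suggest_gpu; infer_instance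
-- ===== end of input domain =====

-- B replaces A's defaultdict grouping and inner minimal-count search loop by a static
-- tier table and a closed-form ceiling division (objective: simpler).

-- ===== PORT A =====
-- gpu = (name, memory, max_gpus)
def pvGpusA : List (String × Int × Int) :=
  [("NVIDIA H100", 80, 8), ("NVIDIA A100", 80, 8),
   ("NVIDIA A6000", 48, 10), ("NVIDIA A40", 48, 10), ("NVIDIA L40", 48, 8),
   ("NVIDIA L40S", 48, 8), ("NVIDIA RTX 6000 Ada", 48, 8),
   ("NVIDIA RTX 4090", 24, 8), ("NVIDIA RTX 3090", 24, 8),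
   ("NVIDIA RTX A5000", 24, 8), ("NVIDIA L4", 24, 8),
   ("NVIDIA RTX 4000", 16, 8), ("NVIDIA A4000", 16, 8)]

-- the 'for num_gpus in range(...)' loop with its break: first num_gpus with enough memory
def pvInnerA (total_memory_gb mem_size : Int) (gpu_list : List (String × Int × Int)) :
    List Int → Option (List (String × String))
  | [] => none
  | num_gpus :: rest =>
      if mem_size * num_gpus ≥ total_memory_gb then
        let compatible := (gpu_list.filter (fun g => num_gpus ≤ g.2.2)).map (·.1)
        if compatible ≠ [] then
          some [("config", PySem.Int.toStr num_gpus ++ " x " ++ PySem.Int.toStr mem_size ++ "GB GPUs"),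
                ("gpu_names", PySem.Str.join ", " compatible)]
        else none
      else pvInnerA total_memory_gb mem_size gpu_list rest

def suggest_gpu (total_memory_gb : Int) : List (List (String × String)) :=
  let gpus := pvGpusA
  let grouped : PySem.Dict Int (List (String × Int × Int)) :=
    gpus.foldl (fun d g => d.insert g.2.1 (d.getD g.2.1 [] ++ [g])) PySem.Dict.empty
  let keys := PySem.List.sorted grouped.keys (fun x => x) true
  keys.foldl (fun acc mem_size =>
    let gpu_list := grouped.getD mem_size []
    match PySem.List.max? (gpu_list.map (·.2.2)) (fun x => x) with
    | none => acc  -- Python max() would raise on an empty group; never reached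
    | some max_gpus =>
        match pvInnerA total_memory_gb mem_size gpu_list (PySem.List.pyRange 1 (max_gpus + 1) 1) with
        | some setup => acc ++ [setup]
        | none => acc) []

-- ===== PORT B =====
def pvTiersB : List (Int × List (String × Int)) :=
  [(80, [("NVIDIA H100", 8), ("NVIDIA A100", 8)]),
   (48, [("NVIDIA A6000", 10), ("NVIDIA A40", 10), ("NVIDIA L40", 8),
         ("NVIDIA L40S", 8), ("NVIDIA RTX 6000 Ada", 8)]),
   (24, [("NVIDIA RTX 4090", 8), ("NVIDIA RTX 3090", 8),
         ("NVIDIA RTX A5000", 8), ("NVIDIA L4", 8)]),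
   (16, [("NVIDIA RTX 4000", 8), ("NVIDIA A4000", 8)])]

def suggest_gpu_alt (total_memory_gb : Int) : List (List (String × String)) :=
  pvTiersB.foldl (fun acc tier =>
    let mem := tier.1
    let needed := max 1 (-(PySem.Int.floordiv (-total_memory_gb) mem))
    let names := (tier.2.filter (fun g => needed ≤ g.2)).map (·.1)
    if names.isEmpty then acc
    else
      acc ++ [[("config", PySem.Int.toStr needed ++ " x " ++ PySem.Int.toStr mem ++ "GB GPUs"),
               ("gpu_names", PySem.Str.join ", " names)]]) []

-- ===== PRECONDITION & SPEC =====
def Spec_suggest_gpu (total_memory_gb : Int) (out : List (List (String × String))) : Prop := out = suggest_gpu_alt total_memory_gb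
instance (total_memory_gb : Int) (out : List (List (String × String))) : Decidable (Spec_suggest_gpu total_memory_gb out) := by unfold Spec_suggest_gpu; infer_instance

-- ===== CLAIM (what is proved, stated in full; the proofs are below) =====
def Claim_equal_suggest_gpu : Prop := ∀ (total_memory_gb : Int), Dom_suggest_gpu total_memory_gb → Spec_suggest_gpu total_memory_gb (suggest_gpu total_memory_gb)

-- ===== LEMMAS AND PROOFS =====

-- proof-only helpers: the four memory groups as A's grouping produces them
def pvG80 : List (String × Int × Int) := [("NVIDIA H100", 80, 8), ("NVIDIA A100", 80, 8)]
def pvG48 : List (String × Int × Int) := [("NVIDIA A6000", 48, 10), ("NVIDIA A40", 48, 10), ("NVIDIA L40", 48, 8), ("NVIDIA L40S", 48, 8), ("NVIDIA RTX 6000 Ada", 48, 8)]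
def pvG24 : List (String × Int × Int) := [("NVIDIA RTX 4090", 24, 8), ("NVIDIA RTX 3090", 24, 8), ("NVIDIA RTX A5000", 24, 8), ("NVIDIA L4", 24, 8)]
def pvG16 : List (String × Int × Int) := [("NVIDIA RTX 4000", 16, 8), ("NVIDIA A4000", 16, 8)]

def pvNeed (t mem : Int) : Int := max 1 (-(PySem.Int.floordiv (-t) mem))

def pvStepA (t mem maxg : Int) (gl : List (String × Int × Int)) (acc : List (List (String × String))) : List (List (String × String)) :=
  match pvInnerA t mem gl (PySem.List.pyRange 1 (maxg + 1) 1) with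
  | some setup => acc ++ [setup]
  | none => acc

def pvStepB (t mem : Int) (grp : List (String × Int)) (acc : List (List (String × String))) : List (List (String × String)) :=
  let needed := pvNeed t mem
  let names := (grp.filter (fun g => needed ≤ g.2)).map (·.1)
  if names.isEmpty then acc
  else acc ++ [[("config", PySem.Int.toStr needed ++ " x " ++ PySem.Int.toStr mem ++ "GB GPUs"), ("gpu_names", PySem.Str.join ", " names)]]

lemma pvNeed_bracket (t mem : Int) (hm : 0 < mem) :
    (-(PySem.Int.floordiv (-t) mem) - 1) * mem < t ∧ t ≤ -(PySem.Int.floordiv (-t) mem) * mem :=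
  (PySem.Int.neg_floordiv_neg_eq_iff_of_pos hm).mp rfl

lemma pvNeed_le (t mem a : Int) (hm : 0 < mem) (ha : 1 ≤ a) (h : t ≤ mem * a) : pvNeed t mem ≤ a := by
  obtain ⟨h1, _⟩ := pvNeed_bracket t mem hm
  have : (-(PySem.Int.floordiv (-t) mem) - 1) * mem < a * mem := by
    calc (-(PySem.Int.floordiv (-t) mem) - 1) * mem < t := h1
    _ ≤ a * mem := by linarith [h, mul_comm mem a]
  have := lt_of_mul_lt_mul_right this (le_of_lt hm)
  simp only [pvNeed]
  omega

lemma pvLt_need (t mem a : Int) (hm : 0 < mem) (h : mem * a < t) : a < pvNeed t mem := by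
  obtain ⟨_, h2⟩ := pvNeed_bracket t mem hm
  have : a * mem < -(PySem.Int.floordiv (-t) mem) * mem := by
    calc a * mem = mem * a := mul_comm a mem
    _ < t := h
    _ ≤ _ := h2
  have := lt_of_mul_lt_mul_right this (le_of_lt hm)
  simp only [pvNeed]
  omega

lemma pvInner_correct (t mem : Int) (hm : 0 < mem) (gl : List (String × Int × Int)) :
    ∀ (k : Nat) (a maxg : Int), (maxg + 1 - a).toNat = k → 1 ≤ a → a ≤ pvNeed t mem →
      pvInnerA t mem gl (PySem.List.pyRange a (maxg + 1) 1) =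
        (if pvNeed t mem ≤ maxg then
          (let compatible := (gl.filter (fun g => pvNeed t mem ≤ g.2.2)).map (·.1)
           if compatible ≠ [] then
             some [("config", PySem.Int.toStr (pvNeed t mem) ++ " x " ++ PySem.Int.toStr mem ++ "GB GPUs"),
                   ("gpu_names", PySem.Str.join ", " compatible)]
           else none)
         else none) := by
  intro k
  induction k with
  | zero =>
      intro a maxg hk ha hneed
      have hba : maxg + 1 ≤ a := by omega
      have hempty : PySem.List.pyRange a (maxg + 1) 1 = [] := by
        rw [PySem.List.pyRange_one]
        simp [Int.toNat_of_nonpos (by omega : maxg + 1 - a ≤ 0)]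
      rw [hempty]
      have : ¬ pvNeed t mem ≤ maxg := by omega
      simp [pvInnerA, this]
  | succ k ih =>
      intro a maxg hk ha hneed
      have hab : a < maxg + 1 := by omega
      rw [PySem.List.pyRange_one_cons hab]
      rw [pvInnerA]
      by_cases hc : mem * a ≥ t
      · rw [if_pos hc]
        have h1 : pvNeed t mem ≤ a := pvNeed_le t mem a hm ha hc
        have heq : pvNeed t mem = a := le_antisymm h1 hneed
        have hle : pvNeed t mem ≤ maxg := by omega
        rw [if_pos hle, heq]
      · rw [if_neg hc]
        rw [not_le] at hc
        have h2 : a < pvNeed t mem := pvLt_need t mem a hm hc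
        exact ih (a + 1) maxg (by omega) (by omega) (by omega)

lemma pvStep_eq (t mem maxg : Int) (hm : 0 < mem) (_hg : 1 ≤ maxg)
    (gl : List (String × Int × Int)) (grp : List (String × Int))
    (hmap : grp = gl.map (fun g => (g.1, g.2.2)))
    (hmax : ∃ g ∈ gl, g.2.2 = maxg) (hbound : ∀ g ∈ gl, g.2.2 ≤ maxg)
    (acc : List (List (String × String))) :
    pvStepA t mem maxg gl acc = pvStepB t mem grp acc := by
  have hnames : (grp.filter (fun g => pvNeed t mem ≤ g.2)).map (·.1)
      = (gl.filter (fun g => pvNeed t mem ≤ g.2.2)).map (·.1) := by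
    subst hmap
    rw [List.filter_map, List.map_map]
    rfl
  rw [pvStepA, pvInner_correct t mem hm gl (maxg + 1 - 1).toNat 1 maxg rfl le_rfl (le_max_left 1 _)]
  by_cases hle : pvNeed t mem ≤ maxg
  · rw [if_pos hle]
    obtain ⟨g, hgmem, hgmax⟩ := hmax
    have hgin : g ∈ gl.filter (fun g => pvNeed t mem ≤ g.2.2) := by
      rw [List.mem_filter]
      exact ⟨hgmem, by simp [hgmax, hle]⟩
    have hne : (gl.filter (fun g => pvNeed t mem ≤ g.2.2)).map (·.1) ≠ [] := by
      intro h
      rw [List.map_eq_nil_iff] at h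
      rw [h] at hgin
      exact absurd hgin (List.not_mem_nil)
    rw [if_pos hne]
    simp only [pvStepB, hnames]
    rw [if_neg (by simpa [List.isEmpty_iff] using hne)]
  · rw [if_neg hle]
    have hempty : (gl.filter (fun g => pvNeed t mem ≤ g.2.2)) = [] := by
      rw [List.filter_eq_nil_iff]
      intro g hgmem
      have := hbound g hgmem
      simp only [decide_eq_true_eq]
      omega
    simp only [pvStepB, hnames, hempty]
    simp

lemma pvShapeA (t : Int) : suggest_gpu t =
    pvStepA t 16 8 pvG16 (pvStepA t 24 8 pvG24 (pvStepA t 48 10 pvG48 (pvStepA t 80 8 pvG80 []))) := rfl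

lemma pvShapeB (t : Int) : suggest_gpu_alt t =
    pvStepB t 16 [("NVIDIA RTX 4000", 8), ("NVIDIA A4000", 8)]
      (pvStepB t 24 [("NVIDIA RTX 4090", 8), ("NVIDIA RTX 3090", 8), ("NVIDIA RTX A5000", 8), ("NVIDIA L4", 8)]
        (pvStepB t 48 [("NVIDIA A6000", 10), ("NVIDIA A40", 10), ("NVIDIA L40", 8), ("NVIDIA L40S", 8), ("NVIDIA RTX 6000 Ada", 8)]
          (pvStepB t 80 [("NVIDIA H100", 8), ("NVIDIA A100", 8)] []))) := rfl

-- ===== VERDICT (by name: the statement is the Claim_ definition above) =====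
theorem suggest_gpu_spec : Claim_equal_suggest_gpu := by
  intro t _
  unfold Spec_suggest_gpu
  rw [pvShapeA, pvShapeB]
  rw [pvStep_eq t 80 8 (by norm_num) (by norm_num) pvG80 _ (by rfl) (by decide) (by decide)]
  rw [pvStep_eq t 48 10 (by norm_num) (by norm_num) pvG48 _ (by rfl) (by decide) (by decide)]
  rw [pvStep_eq t 24 8 (by norm_num) (by norm_num) pvG24 _ (by rfl) (by decide) (by decide)]
  rw [pvStep_eq t 16 8 (by norm_num) (by norm_num) pvG16 _ (by rfl) (by decide) (by decide)]
  rfl
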